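-- pv_equiv track=rewrite | github.com/prism-iq/gaia-protocol | ear/delta.py | loop
-- ===== SOURCE A (Python) =====
-- def recurse(items, depth=0):
--     """simplifie récursivement"""
--     if depth > 5 or len(items) <= 3:
--         return items
--
--     # fusionne paires similaires
--     merged = []
--     skip = set()
--
--     for i, a in enumerate(items):
--         if i in skip:
--             continue
--         found = False
--         for j, b in enumerate(items[i+1:], i+1):
--             if j in skip:
--                 continue
--             # si même longueur ± 2, fusionner
--             if abs(len(a) - len(b)) <= 2:
--                 merged.append(a if len(a) <= len(b) else b)
--                 skip.add(i)
--                 skip.add(j)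
--                 found = True
--                 break
--         if not found and i not in skip:
--             merged.append(a)
--
--     if merged != items:
--         return recurse(merged, depth + 1)
--     return items
--
-- def loop(plus, moins, generations=3):
--     """f: boucle jusqu'à stable"""
--     for g in range(generations):
--         plus = recurse(plus)
--         moins = recurse(moins)
--
--         # échange ce qui est mal placé
--         new_plus = [p for p in plus if len(p) <= 6]
--         new_moins = [m for m in moins if len(m) <= 6]
--
--         if new_plus == plus and new_moins == moins:
--             break
--         plus, moins = new_plus, new_moins
--
--     return plus, moins
-- ===== SOURCE B (Python) =====
-- def _merge(items):
--     """One merge pass: repeatedly take the front item of a worklist and pop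
--     its first similar-length partner (|len difference| <= 2) from the rest."""
--     out = []
--     rest = list(items)
--     while rest:
--         x = rest.pop(0)
--         for k in range(len(rest)):
--             if abs(len(x) - len(rest[k])) <= 2:
--                 y = rest.pop(k)
--                 out.append(x if len(x) <= len(y) else y)
--                 break
--         else:
--             out.append(x)
--     return out
--
-- def _settle(items):
--     """Iterative fixpoint of the merge pass, at most 6 rounds."""
--     for _ in range(6):
--         if len(items) <= 3:
--             return items
--         merged = _merge(items)
--         if merged == items:
--             return items
--         items = merged
--     return items
--
-- def loop(plus, moins, generations=3):
--     g = 0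
--     while g < generations:
--         plus = _settle(plus)
--         moins = _settle(moins)
--         fp = [p for p in plus if len(p) <= 6]
--         fm = [m for m in moins if len(m) <= 6]
--         if fp == plus and fm == moins:
--             break
--         plus, moins = fp, fm
--         g += 1
--     return plus, moins
-- ===== Notes on version B (the rewrite author's own statement) =====
-- stated objective: simpler
-- what changed: Replaces A's recursive `recurse` with index bookkeeping (enumerate over positions, a skip-set, a fresh slice items[i+1:] per outer item) by an iterative fixpoint loop over a plain worklist that pops the front item and pops its first similar-length partner from the rest; no indices, skip set or slice copies are maintained.
import Mathlib
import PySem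

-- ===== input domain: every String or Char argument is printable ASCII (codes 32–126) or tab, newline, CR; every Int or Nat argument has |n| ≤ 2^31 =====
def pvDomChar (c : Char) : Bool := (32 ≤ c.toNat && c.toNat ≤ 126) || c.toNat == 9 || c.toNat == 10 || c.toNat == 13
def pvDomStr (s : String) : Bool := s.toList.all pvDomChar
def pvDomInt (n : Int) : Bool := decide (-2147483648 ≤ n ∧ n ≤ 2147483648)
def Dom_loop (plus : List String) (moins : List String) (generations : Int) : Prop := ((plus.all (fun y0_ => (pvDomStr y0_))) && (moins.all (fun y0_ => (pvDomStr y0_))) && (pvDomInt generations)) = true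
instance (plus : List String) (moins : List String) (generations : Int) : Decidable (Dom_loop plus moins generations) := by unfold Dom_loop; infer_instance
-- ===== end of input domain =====

-- B replaces A's index/skip-set double enumeration by a worklist that pops the
-- first similar-length partner, and A's recursive `recurse` by an iterative
-- fixpoint loop (objective: simpler; same return value, no argument mutation).

-- ===== PORT A =====
-- inner 'for j, b in enumerate(items[i+1:], i+1)' with break: first unskipped partner
def aScan (a : String) (skip : PySem.Set Int) : List (Int × String) → Option (Int × String)
  | [] => none
  | (j, b) :: rest =>
    if PySem.Set.contains skip j then aScan a skip rest
    else if (PySem.Str.len a - PySem.Str.len b).natAbs ≤ 2 then some (j, b)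
    else aScan a skip rest

-- outer 'for i, a in enumerate(items)' with merged/skip state
def aOuter (merged : List String) (skip : PySem.Set Int) : List (Int × String) → List String
  | [] => merged
  | (i, a) :: rest =>
    if PySem.Set.contains skip i then aOuter merged skip rest
    else
      match aScan a skip rest with
      | some (j, b) =>
        aOuter (merged ++ [if PySem.Str.len a ≤ PySem.Str.len b then a else b])
          (PySem.Set.add (PySem.Set.add skip i) j) rest
      | none =>
        aOuter (if !(PySem.Set.contains skip i) then merged ++ [a] else merged) skip rest

def aMerge (items : List String) : List String :=
  aOuter [] PySem.Set.empty (PySem.List.enumerate items 0)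

def aRecurse (items : List String) (depth : Int) : List String :=
  if depth > 5 ∨ items.length ≤ 3 then items
  else
    let merged := aMerge items
    if merged ≠ items then aRecurse merged (depth + 1) else items
termination_by (6 - depth).toNat
decreasing_by omega

-- 'for g in range(generations)' with break
def aGo : Nat → List String → List String → List String × List String
  | 0, plus, moins => (plus, moins)
  | Nat.succ n, plus, moins =>
    let plus' := aRecurse plus 0
    let moins' := aRecurse moins 0
    let newPlus := plus'.filter (fun p => PySem.Str.len p ≤ 6)
    let newMoins := moins'.filter (fun m => PySem.Str.len m ≤ 6)
    if newPlus = plus' ∧ newMoins = moins' then (plus', moins')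
    else aGo n newPlus newMoins

def loop (plus : List String) (moins : List String) (generations : Int) : List String × List String :=
  aGo generations.toNat plus moins

-- ===== PORT B =====
-- 'for k in range(len(rest))' with break: index of first partner (we also carry rest[k])
def bFind (x : String) : List String → Option (Nat × String)
  | [] => none
  | y :: rest =>
    if (PySem.Str.len x - PySem.Str.len y).natAbs ≤ 2 then some (0, y)
    else (bFind x rest).map (fun p => (p.1 + 1, p.2))

-- 'while rest: x = rest.pop(0); …'; rest.pop(k) is List.eraseIdx k
def bMerge (out : List String) : List String → List String
  | [] => out
  | x :: rest =>
    match bFind x rest with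
    | none => bMerge (out ++ [x]) rest
    | some (k, y) =>
      bMerge (out ++ [if PySem.Str.len x ≤ PySem.Str.len y then x else y]) (rest.eraseIdx k)
termination_by l => l.length
decreasing_by all_goals (simp only [List.length_cons]; first | omega | exact Nat.lt_succ_of_le (List.length_eraseIdx_le _ _))

-- 'for _ in range(6)' with early returns
def bSettle : Nat → List String → List String
  | 0, items => items
  | Nat.succ n, items =>
    if items.length ≤ 3 then items
    else
      let merged := bMerge [] items
      if merged = items then items else bSettle n merged

-- 'g = 0; while g < generations: …'
def bGo : Nat → List String → List String → List String × List String
  | 0, plus, moins => (plus, moins)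
  | Nat.succ n, plus, moins =>
    let plus' := bSettle 6 plus
    let moins' := bSettle 6 moins
    let fp := plus'.filter (fun s => PySem.Str.len s ≤ 6)
    let fm := moins'.filter (fun s => PySem.Str.len s ≤ 6)
    if fp = plus' ∧ fm = moins' then (plus', moins')
    else bGo n fp fm

def loop_alt (plus : List String) (moins : List String) (generations : Int) : List String × List String :=
  bGo generations.toNat plus moins

-- ===== PRECONDITION & SPEC =====
def Spec_loop (plus : List String) (moins : List String) (generations : Int) (out : List String × List String) : Prop := out = loop_alt plus moins generations
instance (plus : List String) (moins : List String) (generations : Int) (out : List String × List String) : Decidable (Spec_loop plus moins generations out) := by unfold Spec_loop; infer_instance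

-- ===== CLAIM (what is proved, stated in full; the proofs are below) =====
def Claim_equal_loop : Prop := ∀ (plus : List String) (moins : List String) (generations : Int), Dom_loop plus moins generations → Spec_loop plus moins generations (loop plus moins generations)

-- ===== LEMMAS AND PROOFS =====

-- the strings A still has to process: indices not in the skip set
def remain (skip : PySem.Set Int) (rest : List (Int × String)) : List String :=
  (rest.filter (fun p => !(PySem.Set.contains skip p.1))).map Prod.snd

theorem remain_add_of_not_mem (S : PySem.Set Int) (j : Int) (rest : List (Int × String))
    (h : j ∉ rest.map Prod.fst) :
    remain (PySem.Set.add S j) rest = remain S rest := by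
  unfold remain; congr 1
  apply List.filter_congr
  intro p hp
  have hne : p.1 ≠ j := fun e => h (e ▸ List.mem_map_of_mem hp)
  simp [PySem.Set.mem_add, hne]

theorem remain_elim_add (S : PySem.Set Int) (i j : Int) (rest : List (Int × String))
    (hi : i ∉ rest.map Prod.fst) :
    remain (PySem.Set.add (PySem.Set.add S i) j) rest = remain (PySem.Set.add S j) rest := by
  unfold remain; congr 1
  apply List.filter_congr
  intro p hp
  have hne : p.1 ≠ i := fun e => hi (e ▸ List.mem_map_of_mem hp)
  simp [PySem.Set.mem_add, hne]

theorem scan_mem (a : String) (S : PySem.Set Int) :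
    ∀ (rest : List (Int × String)) (j : Int) (b : String),
      aScan a S rest = some (j, b) → (j, b) ∈ rest := by
  intro rest
  induction rest with
  | nil => intro j b h; simp [aScan] at h
  | cons p rest ih =>
    obtain ⟨j0, b0⟩ := p
    intro j b h
    by_cases hc : j0 ∈ S
    · exact List.mem_cons_of_mem _ (ih j b (by simpa [aScan, hc] using h))
    · by_cases hm : ((a.length : Int) - (b0.length : Int)).natAbs ≤ 2
      · have : j0 = j ∧ b0 = b := by simpa [aScan, hc, hm] using h
        simp [this.1, this.2]
      · exact List.mem_cons_of_mem _ (ih j b (by simpa [aScan, hc, hm] using h))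

theorem scan_corr (a : String) (S : PySem.Set Int) (rest : List (Int × String))
    (hn : (rest.map Prod.fst).Nodup) :
    (aScan a S rest = none → bFind a (remain S rest) = none) ∧
    (∀ j b, aScan a S rest = some (j, b) →
      ∃ k, bFind a (remain S rest) = some (k, b) ∧
        remain (PySem.Set.add S j) rest = (remain S rest).eraseIdx k) := by
  induction rest generalizing S with
  | nil => exact ⟨fun _ => rfl, fun j b h => by simp [aScan] at h⟩
  | cons p rest ih =>
    obtain ⟨j0, b0⟩ := p
    have hmc : (j0 :: rest.map Prod.fst).Nodup := by simpa using hn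
    have hj0 : j0 ∉ rest.map Prod.fst := (List.nodup_cons.mp hmc).1
    have hn' : (rest.map Prod.fst).Nodup := (List.nodup_cons.mp hmc).2
    by_cases hc : j0 ∈ S
    · have hr : remain S ((j0, b0) :: rest) = remain S rest := by simp [remain, hc]
      constructor
      · intro h
        rw [hr]; exact (ih S hn').1 (by simpa [aScan, hc] using h)
      · intro j b h
        obtain ⟨k, hk1, hk2⟩ := (ih S hn').2 j b (by simpa [aScan, hc] using h)
        refine ⟨k, by rw [hr]; exact hk1, ?_⟩
        calc remain (PySem.Set.add S j) ((j0, b0) :: rest)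
            = remain (PySem.Set.add S j) rest := by simp [remain, hc]
          _ = (remain S rest).eraseIdx k := hk2
          _ = (remain S ((j0, b0) :: rest)).eraseIdx k := by rw [hr]
    · have hr : remain S ((j0, b0) :: rest) = b0 :: remain S rest := by simp [remain, hc]
      by_cases hm : ((a.length : Int) - (b0.length : Int)).natAbs ≤ 2
      · constructor
        · intro h; simp [aScan, hc, hm] at h
        · intro j b h
          have he : j0 = j ∧ b0 = b := by simpa [aScan, hc, hm] using h
          obtain ⟨rfl, rfl⟩ := he
          refine ⟨0, by rw [hr]; simp [bFind, hm], ?_⟩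
          rw [hr]
          have h1 : remain (PySem.Set.add S j0) ((j0, b0) :: rest)
              = remain (PySem.Set.add S j0) rest := by
            simp [remain]
          rw [h1, remain_add_of_not_mem _ _ _ hj0]
          simp
      · have ha : aScan a S ((j0, b0) :: rest) = aScan a S rest := by
          simp [aScan, hc, hm]
        constructor
        · intro h
          rw [hr]
          have := (ih S hn').1 (ha ▸ h)
          simp [bFind, hm, this]
        · intro j b h
          obtain ⟨k, hk1, hk2⟩ := (ih S hn').2 j b (ha ▸ h)
          have hjmem : j ∈ rest.map Prod.fst :=
            List.mem_map_of_mem (scan_mem a S rest j b (ha ▸ h))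
          have hj0j : j0 ≠ j := fun e => hj0 (e ▸ hjmem)
          refine ⟨k + 1, by rw [hr]; simp [bFind, hm, hk1], ?_⟩
          rw [hr]
          have h1 : remain (PySem.Set.add S j) ((j0, b0) :: rest)
              = b0 :: remain (PySem.Set.add S j) rest := by
            simp [remain, hc, hj0j]
          rw [h1, hk2]
          rfl

theorem outer_corr (rest : List (Int × String)) (S : PySem.Set Int) (merged : List String)
    (hn : (rest.map Prod.fst).Nodup) :
    aOuter merged S rest = bMerge merged (remain S rest) := by
  induction rest generalizing S merged with
  | nil => simp [aOuter, remain, bMerge]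
  | cons p rest ih =>
    obtain ⟨i, a⟩ := p
    have hmc : (i :: rest.map Prod.fst).Nodup := by simpa using hn
    have hi : i ∉ rest.map Prod.fst := (List.nodup_cons.mp hmc).1
    have hn' : (rest.map Prod.fst).Nodup := (List.nodup_cons.mp hmc).2
    by_cases hc : i ∈ S
    · have hr : remain S ((i, a) :: rest) = remain S rest := by simp [remain, hc]
      rw [hr, ← ih S merged hn']
      simp [aOuter, hc]
    · have hr : remain S ((i, a) :: rest) = a :: remain S rest := by simp [remain, hc]
      rcases hsc : aScan a S rest with _ | ⟨j, b⟩
      · have hb : bFind a (remain S rest) = none := (scan_corr a S rest hn').1 hsc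
        rw [hr]
        have hstep : bMerge merged (a :: remain S rest)
            = bMerge (merged ++ [a]) (remain S rest) := by
          rw [bMerge]; simp [hb]
        rw [hstep, ← ih S (merged ++ [a]) hn']
        simp [aOuter, hc, hsc]
      · obtain ⟨k, hk1, hk2⟩ := (scan_corr a S rest hn').2 j b hsc
        have hrm : remain (PySem.Set.add (PySem.Set.add S i) j) rest
            = (remain S rest).eraseIdx k := by
          rw [remain_elim_add S i j rest hi, hk2]
        rw [hr]
        have hstep : bMerge merged (a :: remain S rest)
            = bMerge (merged ++ [if PySem.Str.len a ≤ PySem.Str.len b then a else b])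
                ((remain S rest).eraseIdx k) := by
          rw [bMerge]; simp [hk1]
        rw [hstep, ← hrm, ← ih _ _ hn']
        simp [aOuter, hc, hsc]

theorem remain_empty_enumerate (items : List String) :
    remain PySem.Set.empty (PySem.List.enumerate items 0) = items := by
  have h : ∀ p ∈ PySem.List.enumerate items 0,
      (!(PySem.Set.contains PySem.Set.empty p.1)) = true := by
    intro p _; rfl
  unfold remain
  rw [List.filter_eq_self.mpr h, PySem.List.map_snd_enumerate]

theorem nodup_fst_enumerate (items : List String) :
    ((PySem.List.enumerate items 0).map Prod.fst).Nodup := by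
  have h := PySem.List.pairwise_lt_enumerate (xs := items) (s := 0)
  have h2 : ((PySem.List.enumerate items 0).map Prod.fst).Pairwise (· < ·) :=
    List.pairwise_map.mpr h
  exact h2.imp ne_of_lt

theorem merge_corr (items : List String) : aMerge items = bMerge [] items := by
  unfold aMerge
  rw [outer_corr _ _ _ (nodup_fst_enumerate items), remain_empty_enumerate]

theorem recurse_corr : ∀ (n : Nat) (items : List String) (d : Int), d = 6 - (n : Int) →
    aRecurse items d = bSettle n items := by
  intro n
  induction n with
  | zero =>
    intro items d hd
    rw [aRecurse]
    simp [bSettle, hd]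
  | succ n ih =>
    intro items d hd
    have hd5 : ¬ d > 5 := by omega
    rw [aRecurse]
    by_cases hl : items.length ≤ 3
    · simp [bSettle, hd5, hl]
    · have hguard : ¬ (d > 5 ∨ items.length ≤ 3) := by omega
      rw [if_neg hguard]
      show (if aMerge items ≠ items then aRecurse (aMerge items) (d + 1) else items)
          = bSettle (n + 1) items
      rw [merge_corr]
      by_cases he : bMerge [] items = items
      · simp [bSettle, hl, he]
      · rw [if_pos he, ih _ (d + 1) (by omega)]
        simp [bSettle, hl, he]

theorem go_corr : ∀ (n : Nat) (p m : List String), aGo n p m = bGo n p m := by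
  intro n
  induction n with
  | zero => intro p m; rfl
  | succ n ih =>
    intro p m
    have h6 : ∀ xs : List String, aRecurse xs 0 = bSettle 6 xs := fun xs =>
      recurse_corr 6 xs 0 (by norm_num)
    simp only [aGo, bGo, h6]
    split
    · rfl
    · exact ih _ _

-- ===== VERDICT (by name: the statement is the Claim_ definition above) =====
theorem loop_spec : Claim_equal_loop := by
  intro plus moins generations _
  unfold Spec_loop loop loop_alt
  exact go_corr _ _ _
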